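-- pv_equiv track=rewrite | github.com/xavier-h-10/AA228-CS238-Student | project2/large.py | find_nearest_neighbors
-- ===== SOURCE A (Python) =====
-- import bisect
--
-- def find_nearest_neighbors(missing_states, unique_S):
--     nearest_neighbor = {}
--     for i in missing_states:
--         index_right = bisect.bisect_right(unique_S, i)
--         index_left = index_right - 1
--
--         if index_right == len(unique_S):
--             min_index = index_left
--         elif index_left == -1:
--             min_index = index_right
--         else:
--             if unique_S[index_right] - i > i - unique_S[index_left]:
--                 min_index = index_left
--             else:
--                 min_index = index_right
--
--         nearest_neighbor[i] = unique_S[min_index]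
--     return nearest_neighbor
-- ===== SOURCE B (Python) =====
-- def find_nearest_neighbors(missing_states, unique_S):
--     n = len(unique_S)
--
--     def locate(i, lo, hi):
--         # divide-and-conquer insertion point: first position whose suffix is all > i
--         if lo >= hi:
--             return lo
--         mid = (lo + hi) // 2
--         if unique_S[mid] <= i:
--             return locate(i, mid + 1, hi)
--         return locate(i, lo, mid)
--
--     cache = {}
--
--     def nearest(i):
--         if i not in cache:
--             j = locate(i, 0, n)
--             step_back = j == n or (j > 0 and unique_S[j] - i > i - unique_S[j - 1])
--             cache[i] = unique_S[j - step_back]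
--         return cache[i]
--
--     return {i: nearest(i) for i in missing_states}
-- ===== Notes on version B (the rewrite author's own statement) =====
-- stated objective: alternative
-- what changed: B drops the bisect library call and A's three-branch min_index analysis: it locates the insertion point with its own recursive divide-and-conquer helper, turns the three-way selection into a single arithmetic step-back subtraction, answers each DISTINCT missing state once through a cache dict, and assembles the result as a dict comprehension.
import Mathlib
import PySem

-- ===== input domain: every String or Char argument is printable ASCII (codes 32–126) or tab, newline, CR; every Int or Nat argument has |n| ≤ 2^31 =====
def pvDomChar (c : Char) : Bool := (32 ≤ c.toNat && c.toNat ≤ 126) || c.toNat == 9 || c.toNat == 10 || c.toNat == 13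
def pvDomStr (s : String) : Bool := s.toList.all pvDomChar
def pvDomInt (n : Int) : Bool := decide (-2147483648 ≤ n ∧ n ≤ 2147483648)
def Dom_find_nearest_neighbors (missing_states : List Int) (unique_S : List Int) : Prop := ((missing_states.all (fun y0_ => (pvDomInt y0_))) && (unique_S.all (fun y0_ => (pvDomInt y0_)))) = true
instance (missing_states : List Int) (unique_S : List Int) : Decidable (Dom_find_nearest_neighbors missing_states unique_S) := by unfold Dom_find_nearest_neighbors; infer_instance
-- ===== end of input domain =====

-- B replaces the bisect library call by its own recursive locate, replaces A's three-branch
-- index selection by one arithmetic step-back, and resolves each distinct missing state once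
-- through a cache dict; objective: alternative (same result by a different decomposition).


-- ===== PORT A =====
-- per-state value chosen by A's loop body (bisect_right, then the three-way case analysis)
def pvAVal (unique_S : List Int) (i : Int) : Int :=
  let index_right : Nat := PySem.List.bisectRight unique_S i
  let index_left : Int := (index_right : Int) - 1
  let min_index : Int :=
    if index_right = unique_S.length then index_left
    else if index_left = -1 then (index_right : Int)
    else if PySem.List.pyGetD unique_S (index_right : Int) 0 - i >
            i - PySem.List.pyGetD unique_S index_left 0 then index_left
    else (index_right : Int)
  PySem.List.pyGetD unique_S min_index 0

def find_nearest_neighbors (missing_states : List Int) (unique_S : List Int) : List (Int × Int) :=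
  (missing_states.foldl
    (fun d i => d.insert i (pvAVal unique_S i))
    (PySem.Dict.empty : PySem.Dict Int Int)).items

-- ===== PORT B =====
-- B's recursive insertion-point helper 'locate' (indices stay in range: lo < hi ≤ length)
def pvLocate (unique_S : List Int) (i : Int) (lo hi : Nat) : Nat :=
  if h : lo < hi then
    if PySem.List.pyGetD unique_S (((lo + hi) / 2 : Nat) : Int) 0 ≤ i then
      pvLocate unique_S i ((lo + hi) / 2 + 1) hi
    else
      pvLocate unique_S i lo ((lo + hi) / 2)
  else lo
termination_by hi - lo
decreasing_by all_goals omega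

-- B's 'nearest' body on a cache miss: locate, then one arithmetic step-back
def pvBVal (unique_S : List Int) (i : Int) : Int :=
  let n := unique_S.length
  let j := pvLocate unique_S i 0 n
  let step_back : Nat :=
    if j = n ∨ (0 < j ∧ PySem.List.pyGetD unique_S (j : Int) 0 - i >
        i - PySem.List.pyGetD unique_S ((j : Int) - 1) 0) then 1 else 0
  PySem.List.pyGetD unique_S ((j : Int) - (step_back : Int)) 0

-- one step of the comprehension: state = (cache, result built so far)
def pvNearestStep (unique_S : List Int)
    (st : PySem.Dict Int Int × PySem.Dict Int Int) (i : Int) :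
    PySem.Dict Int Int × PySem.Dict Int Int :=
  match st.1.get? i with
  | some v => (st.1, st.2.insert i v)
  | none => (st.1.insert i (pvBVal unique_S i), st.2.insert i (pvBVal unique_S i))

def find_nearest_neighbors_alt (missing_states : List Int) (unique_S : List Int) : List (Int × Int) :=
  (missing_states.foldl (pvNearestStep unique_S)
    ((PySem.Dict.empty : PySem.Dict Int Int), (PySem.Dict.empty : PySem.Dict Int Int))).2.items

-- ===== PRECONDITION & SPEC =====
-- Pre_ excludes only empty unique_S with non-empty missing_states, where A raises IndexError
-- (unique_S[-1] on an empty list) and B raises IndexError too (unique_S[j - step_back] there).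
def Pre_find_nearest_neighbors (missing_states : List Int) (unique_S : List Int) : Prop :=
  unique_S = [] → missing_states = []
instance (missing_states : List Int) (unique_S : List Int) : Decidable (Pre_find_nearest_neighbors missing_states unique_S) := by unfold Pre_find_nearest_neighbors; infer_instance

def pvWitness_find_nearest_neighbors : List Int × List Int := ([1, 7, -3], [0, 2, 10])

def Spec_find_nearest_neighbors (missing_states : List Int) (unique_S : List Int) (out : List (Int × Int)) : Prop := out = find_nearest_neighbors_alt missing_states unique_S
instance (missing_states : List Int) (unique_S : List Int) (out : List (Int × Int)) : Decidable (Spec_find_nearest_neighbors missing_states unique_S out) := by unfold Spec_find_nearest_neighbors; infer_instance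

-- ===== CLAIM (what is proved, stated in full; the proofs are below) =====
def Claim_equal_find_nearest_neighbors : Prop := ∀ (missing_states : List Int) (unique_S : List Int), Dom_find_nearest_neighbors missing_states unique_S → Pre_find_nearest_neighbors missing_states unique_S → Spec_find_nearest_neighbors missing_states unique_S (find_nearest_neighbors missing_states unique_S)

-- ===== LEMMAS AND PROOFS =====

-- PySem's bisect loop and B's recursive locate take the same path, step for step
theorem pv_loop_eq (us : List Int) (i : Int) :
    ∀ (fuel lo hi : Nat), hi - lo ≤ fuel → hi ≤ us.length →
      PySem.List.bisectRightLoop us i fuel lo hi = pvLocate us i lo hi := by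
  intro fuel
  induction fuel with
  | zero =>
      intro lo hi hf _
      unfold PySem.List.bisectRightLoop
      rw [pvLocate, dif_neg (by omega)]
  | succ f ih =>
      intro lo hi hf hhi
      unfold PySem.List.bisectRightLoop
      by_cases hlh : lo < hi
      · rw [if_pos hlh]
        have hmid : (lo + hi) / 2 < us.length := by omega
        rw [List.getElem?_eq_getElem hmid]
        dsimp only
        rw [pvLocate, dif_pos hlh, PySem.List.pyGetD_natCast,
          List.getD_eq_getElem us 0 hmid]
        by_cases hcmp : us[(lo + hi) / 2] ≤ i
        · rw [if_neg (not_lt.mpr hcmp), if_pos hcmp]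
          exact ih ((lo + hi) / 2 + 1) hi (by omega) hhi
        · rw [if_pos (lt_of_not_ge hcmp), if_neg hcmp]
          exact ih lo ((lo + hi) / 2) (by omega) (by omega)
      · rw [if_neg hlh, pvLocate, dif_neg hlh]

theorem pv_bisect_eq (us : List Int) (i : Int) :
    PySem.List.bisectRight us i = pvLocate us i 0 us.length :=
  pv_loop_eq us i us.length 0 us.length (by omega) (le_refl _)

-- the per-state values agree on EVERY list (A's three branches = B's step-back arithmetic)
theorem pvVal_eq (us : List Int) (i : Int) : pvAVal us i = pvBVal us i := by
  simp only [pvAVal, pvBVal, ← pv_bisect_eq]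
  set j := PySem.List.bisectRight us i with hj
  by_cases h1 : j = us.length
  · rw [if_pos h1, if_pos (Or.inl h1)]
    norm_num
  · rw [if_neg h1]
    by_cases h0 : j = 0
    · rw [if_pos (show (j : Int) - 1 = -1 by omega)]
      rw [if_neg (fun hor => hor.elim h1 (fun hc => absurd hc.1 (by omega)))]
      norm_num
    · rw [if_neg (show ¬((j : Int) - 1 = -1) by omega)]
      by_cases hC : PySem.List.pyGetD us (j : Int) 0 - i >
          i - PySem.List.pyGetD us ((j : Int) - 1) 0
      · rw [if_pos hC, if_pos (Or.inr ⟨by omega, hC⟩)]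
        norm_num
      · rw [if_neg hC, if_neg (fun hor => hor.elim h1 (fun hc => hC hc.2))]
        norm_num

-- the cache never changes a value: the result dict is the plain insert fold
theorem pv_cache_fold (us : List Int) : ∀ (ms : List Int) (c res : PySem.Dict Int Int),
    (∀ k v, c.get? k = some v → v = pvBVal us k) →
    (ms.foldl (pvNearestStep us) (c, res)).2
      = ms.foldl (fun r i => r.insert i (pvBVal us i)) res := by
  intro ms
  induction ms with
  | nil => intro c res _; rfl
  | cons i ms ih =>
      intro c res hinv
      simp only [List.foldl_cons]
      cases hci : c.get? i with
      | some v =>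
          have hv : v = pvBVal us i := hinv i v hci
          simp only [pvNearestStep, hci, hv]
          exact ih c _ hinv
      | none =>
          simp only [pvNearestStep, hci]
          refine ih _ _ ?_
          intro k v hk
          rw [PySem.Dict.get?_insert] at hk
          split_ifs at hk with hk'
          · injection hk with h
            rw [← h, hk']
          · exact hinv k v hk

theorem find_nearest_neighbors_spec : Claim_equal_find_nearest_neighbors := by
  intro ms us _ _
  unfold Spec_find_nearest_neighbors find_nearest_neighbors find_nearest_neighbors_alt
  rw [pv_cache_fold us ms PySem.Dict.empty PySem.Dict.empty
    (by intro k v h; rw [PySem.Dict.get?_empty] at h; cases h)]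
  have hfun : pvAVal us = pvBVal us := funext fun i => pvVal_eq us i
  simp only [hfun]
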